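-- pv_equiv track=rewrite | github.com/Matheus-F-Scatolin/MC102 | lab08.py | encontrar_pior_filme
-- ===== SOURCE A (Python) =====
-- def encontrar_pior_filme(vencedores_individuais: list[str], soma_medias: dict[str, int]) -> str:
--     '''
--     Função que, dado uma lista com os vencedores de cada categoria,
--     retorna o vencedor da categoria pior filme
--
--     Parâmetros:
--         vencedores_individuais (list[str]): lista com os vencedores
--     de cada categoria simples
--          soma_medias (dict[str, int]): dicionário com a soma das médias
--     de cada filme
--
--     Retorna:
--         str: vencedor da categoria pior filme.
--     '''
--     maiores_vencedores = []
--     n_max_de_vitorias = 0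
--     for filme in vencedores_individuais:
--         if vencedores_individuais.count(filme) >= n_max_de_vitorias and filme not in maiores_vencedores:
--             if vencedores_individuais.count(filme) > n_max_de_vitorias:
--                 maiores_vencedores.clear()
--             maiores_vencedores.append(filme)
--             n_max_de_vitorias = vencedores_individuais.count(filme)
--     if len(maiores_vencedores) == 1:
--         return maiores_vencedores[0]
--     else:
--         # Testar o critério de desempate
--         maior_soma_medias = 0
--         vencedor = ''
--         for filme in vencedores_individuais:
--             if soma_medias[filme] > maior_soma_medias:
--                 maior_soma_medias = soma_medias[filme]
--                 vencedor = filme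
--         return vencedor
-- ===== SOURCE B (Python) =====
-- def encontrar_pior_filme(vencedores_individuais: list[str], soma_medias: dict[str, int]) -> str:
--     # Count wins in one dict pass; if one film leads outright it wins, otherwise
--     # the listed film with the highest score sum (first occurrence) wins.
--     if not vencedores_individuais:
--         return ''
--     contagens = {}
--     for filme in vencedores_individuais:
--         contagens[filme] = contagens.get(filme, 0) + 1
--     n_max = max(contagens.values())
--     maiores = [filme for filme in contagens if contagens[filme] == n_max]
--     if len(maiores) == 1:
--         return maiores[0]
--     maior = max(soma_medias[filme] for filme in vencedores_individuais)
--     return next(filme for filme in vencedores_individuais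
--                 if soma_medias[filme] == maior)
-- ===== Notes on version B (the rewrite author's own statement) =====
-- stated objective: faster
-- what changed: Replaces A's quadratic scan (list.count called repeatedly plus clear/append bookkeeping) with a single counting-dict pass followed by one filter over the dict keys, and replaces A's running-max tie-break accumulator with max-then-first-match; Pre_ also excludes inputs where the tie-break runs with all score sums <= 0 while some film is titled '', on which any result is ambiguous with A's no-winner sentinel ''.
-- intended difference: On nonempty inputs where the tie-break runs (no unique most-winning film) and every listed film's score sum is <= 0, A returns '' because its running maximum starts at 0 with a strict '>', while B returns the first film attaining the maximal score sum, which is the intended tie-break winner. — e.g. on encontrar_pior_filme(["a", "b"], [("a", 0), ("b", -1)]): A returns "", B returns "a"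
-- outside the precondition, e.g. on encontrar_pior_filme(['a', ''], {'a': 0, '': -1}): A returns '', B returns 'a'; on encontrar_pior_filme(['', 'a'], {'': 0, 'a': 0}): A returns '', B returns ''
import Mathlib
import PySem

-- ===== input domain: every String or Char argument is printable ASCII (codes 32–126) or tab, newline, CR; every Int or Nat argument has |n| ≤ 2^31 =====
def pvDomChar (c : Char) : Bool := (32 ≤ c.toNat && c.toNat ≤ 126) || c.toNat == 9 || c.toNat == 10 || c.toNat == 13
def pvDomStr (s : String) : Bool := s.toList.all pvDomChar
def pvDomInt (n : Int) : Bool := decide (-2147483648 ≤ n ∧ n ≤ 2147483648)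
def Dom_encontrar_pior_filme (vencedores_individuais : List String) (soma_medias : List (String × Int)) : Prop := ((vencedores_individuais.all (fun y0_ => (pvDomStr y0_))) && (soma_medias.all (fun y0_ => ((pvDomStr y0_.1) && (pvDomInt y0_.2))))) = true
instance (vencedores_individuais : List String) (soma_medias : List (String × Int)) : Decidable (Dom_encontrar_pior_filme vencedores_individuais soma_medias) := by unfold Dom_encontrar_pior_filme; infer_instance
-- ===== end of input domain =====

-- B replaces A's quadratic repeated-count phase with one counting dict + one filter,
-- and the tie-break accumulator with max-then-first-match; A = B outside D_ (tie-break with all sums <= 0).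


-- ===== PORT A =====
-- soma_medias[filme]: dict lookup; `.getD 0` is exact on Pre_, where every key looked up is present.
def encontrar_pior_filme (vencedores_individuais : List String) (soma_medias : List (String × Int)) : String :=
  let st := vencedores_individuais.foldl
    (fun (st : List String × Int) filme =>
      if (vencedores_individuais.count filme : Int) ≥ st.2 ∧ ¬ filme ∈ st.1 then
        ((if (vencedores_individuais.count filme : Int) > st.2 then ([] : List String) else st.1)
           ++ [filme], (vencedores_individuais.count filme : Int))
      else st)
    ([], 0)
  if st.1.length = 1 then (PySem.List.pyGet? st.1 0).getD ""
  else
    (vencedores_individuais.foldl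
      (fun (acc : Int × String) filme =>
        if (PySem.Dict.get? (PySem.Dict.mk soma_medias) filme).getD 0 > acc.1 then
          ((PySem.Dict.get? (PySem.Dict.mk soma_medias) filme).getD 0, filme)
        else acc)
      (0, "")).2

-- ===== PORT B =====
-- soma_medias[filme]: dict lookup; `.getD 0` is exact on Pre_; max over a nonempty list and
-- the final `next` always produce a value, so the trailing `.getD` defaults are unreachable.
def encontrar_pior_filme_alt (vencedores_individuais : List String) (soma_medias : List (String × Int)) : String :=
  if vencedores_individuais = [] then ""
  else
    let contagens := vencedores_individuais.foldl
      (fun (d : PySem.Dict String Int) filme => d.insert filme (d.getD filme 0 + 1)) PySem.Dict.empty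
    let n_max := (PySem.List.max? contagens.values (fun v => v)).getD 0
    let maiores := contagens.keys.filter (fun filme => contagens.getD filme 0 == n_max)
    if maiores.length = 1 then (PySem.List.pyGet? maiores 0).getD ""
    else
      let maior := (PySem.List.max? (vencedores_individuais.map
        (fun filme => (PySem.Dict.get? (PySem.Dict.mk soma_medias) filme).getD 0)) (fun v => v)).getD 0
      (vencedores_individuais.find?
        (fun filme => (PySem.Dict.get? (PySem.Dict.mk soma_medias) filme).getD 0 == maior)).getD ""

-- ===== PRECONDITION & SPEC =====
-- the running maximum of per-film win counts (0 for the empty list)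
def pvMaxCount (vencedores_individuais : List String) : Int :=
  vencedores_individuais.foldl (fun x g => max x (vencedores_individuais.count g : Int)) 0

-- Pre_ excludes the inputs where Python A raises KeyError (the tie-break loop runs — no unique
-- most-winning film — while some listed film is missing from soma_medias), and the inputs where the
-- tie-break runs with every score sum <= 0 while a film is titled '' — there any result is ambiguous
-- with A's no-winner sentinel ''.
def Pre_encontrar_pior_filme (vencedores_individuais : List String) (soma_medias : List (String × Int)) : Prop :=
  (((PySem.List.dedup vencedores_individuais).filter
      (fun f => (vencedores_individuais.count f : Int) == pvMaxCount vencedores_individuais)).length = 1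
    ∨ ∀ f ∈ vencedores_individuais, f ∈ soma_medias.map Prod.fst)
  ∧ ¬ ("" ∈ vencedores_individuais
    ∧ (∀ f ∈ vencedores_individuais, (PySem.Dict.get? (PySem.Dict.mk soma_medias) f).getD 0 ≤ 0)
    ∧ ((PySem.List.dedup vencedores_individuais).filter
        (fun f => (vencedores_individuais.count f : Int) == pvMaxCount vencedores_individuais)).length ≠ 1)

instance (vencedores_individuais : List String) (soma_medias : List (String × Int)) : Decidable (Pre_encontrar_pior_filme vencedores_individuais soma_medias) := by unfold Pre_encontrar_pior_filme; infer_instance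

def pvWitness_encontrar_pior_filme : List String × (List (String × Int)) :=
  (["a", "b"], [("a", 3), ("b", 1)])

-- On nonempty inputs where the tie-break runs (no unique most-winning film) and every listed
-- film's score sum is <= 0, A returns '' (its running maximum starts at 0 with a strict '>'),
-- while B returns the first film attaining the maximal score sum — the intended winner.
def D_encontrar_pior_filme (vencedores_individuais : List String) (soma_medias : List (String × Int)) : Prop :=
  vencedores_individuais ≠ [] ∧
  (∀ f ∈ vencedores_individuais, (PySem.Dict.get? (PySem.Dict.mk soma_medias) f).getD 0 ≤ 0) ∧
  ((PySem.List.dedup vencedores_individuais).filter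
      (fun f => (vencedores_individuais.count f : Int) == pvMaxCount vencedores_individuais)).length ≠ 1

instance (vencedores_individuais : List String) (soma_medias : List (String × Int)) : Decidable (D_encontrar_pior_filme vencedores_individuais soma_medias) := by unfold D_encontrar_pior_filme; infer_instance

def Spec_encontrar_pior_filme (vencedores_individuais : List String) (soma_medias : List (String × Int)) (out : String) : Prop := ¬ D_encontrar_pior_filme vencedores_individuais soma_medias → out = encontrar_pior_filme_alt vencedores_individuais soma_medias
instance (vencedores_individuais : List String) (soma_medias : List (String × Int)) (out : String) : Decidable (Spec_encontrar_pior_filme vencedores_individuais soma_medias out) := by unfold Spec_encontrar_pior_filme; infer_instance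

def pvDiffWitness_encontrar_pior_filme : List String × (List (String × Int)) :=
  (["a", "b"], [("a", 0), ("b", -1)])
def pvDiffWitnessOut_encontrar_pior_filme : String × String := ("", "a")

-- ===== CLAIM (what is proved, stated in full; the proofs are below) =====
def Claim_unchanged_encontrar_pior_filme : Prop := ∀ (vencedores_individuais : List String) (soma_medias : List (String × Int)), Dom_encontrar_pior_filme vencedores_individuais soma_medias → Pre_encontrar_pior_filme vencedores_individuais soma_medias → Spec_encontrar_pior_filme vencedores_individuais soma_medias (encontrar_pior_filme vencedores_individuais soma_medias)
def Claim_exact_encontrar_pior_filme : Prop := ∀ (vencedores_individuais : List String) (soma_medias : List (String × Int)), Dom_encontrar_pior_filme vencedores_individuais soma_medias → Pre_encontrar_pior_filme vencedores_individuais soma_medias → D_encontrar_pior_filme vencedores_individuais soma_medias → encontrar_pior_filme vencedores_individuais soma_medias ≠ encontrar_pior_filme_alt vencedores_individuais soma_medias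
def Claim_changed_encontrar_pior_filme : Prop := Dom_encontrar_pior_filme (pvDiffWitness_encontrar_pior_filme.1) (pvDiffWitness_encontrar_pior_filme.2) ∧ Pre_encontrar_pior_filme (pvDiffWitness_encontrar_pior_filme.1) (pvDiffWitness_encontrar_pior_filme.2) ∧ D_encontrar_pior_filme (pvDiffWitness_encontrar_pior_filme.1) (pvDiffWitness_encontrar_pior_filme.2) ∧ encontrar_pior_filme (pvDiffWitness_encontrar_pior_filme.1) (pvDiffWitness_encontrar_pior_filme.2) = pvDiffWitnessOut_encontrar_pior_filme.1 ∧ encontrar_pior_filme_alt (pvDiffWitness_encontrar_pior_filme.1) (pvDiffWitness_encontrar_pior_filme.2) = pvDiffWitnessOut_encontrar_pior_filme.2 ∧ pvDiffWitnessOut_encontrar_pior_filme.1 ≠ pvDiffWitnessOut_encontrar_pior_filme.2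

-- ===== LEMMAS AND PROOFS =====

def pvMx (c : String → Int) (p : List String) : Int :=
  p.foldl (fun x g => max x (c g)) 0

def pvSel (c : String → Int) (p : List String) : List String :=
  (PySem.List.dedup p).filter (fun g => c g == pvMx c p)

theorem mem_pvSel (c : String → Int) (p : List String) (g : String) :
    g ∈ pvSel c p ↔ g ∈ p ∧ c g = pvMx c p := by
  simp [pvSel]

theorem pvMx_append (c : String → Int) (p : List String) (f : String) :
    pvMx c (p ++ [f]) = max (pvMx c p) (c f) := by
  simp [pvMx, List.foldl_append]

theorem dedup_append_singleton (p : List String) (f : String) :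
    PySem.List.dedup (p ++ [f]) =
      if f ∈ p then PySem.List.dedup p else PySem.List.dedup p ++ [f] := by
  simp only [PySem.List.dedup_eq_ofList, PySem.Set.ofList_eq_foldl, List.foldl_append,
    List.foldl_cons, List.foldl_nil]
  show PySem.Set.add _ f = _
  rw [show PySem.Set.add (List.foldl PySem.Set.add [] p) f
      = if (List.foldl PySem.Set.add [] p).contains f then List.foldl PySem.Set.add [] p
        else List.foldl PySem.Set.add [] p ++ [f] from rfl]
  rw [← PySem.Set.ofList_eq_foldl]
  by_cases h : f ∈ p
  · simp [h, (PySem.Set.mem_ofList p f).mpr h]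
  · have : ¬ f ∈ PySem.Set.ofList p := by rw [PySem.Set.mem_ofList]; exact h
    simp [h, this]

theorem le_pvMx (c : String → Int) (p : List String) :
    0 ≤ pvMx c p ∧ ∀ g ∈ p, c g ≤ pvMx c p :=
  PySem.List.le_foldl_max_int p c 0

theorem step_sel (c : String → Int) (p : List String) (f : String) :
    (if c f ≥ pvMx c p ∧ ¬ f ∈ pvSel c p then
       ((if c f > pvMx c p then ([] : List String) else pvSel c p) ++ [f], c f)
     else (pvSel c p, pvMx c p)) = (pvSel c (p ++ [f]), pvMx c (p ++ [f])) := by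
  have hb := (le_pvMx c p).2
  have hmx := pvMx_append c p f
  rcases lt_trichotomy (c f) (pvMx c p) with hlt | heq | hgt
  · rw [if_neg (fun h => absurd h.1 (not_le.mpr hlt))]
    have hmx' : pvMx c (p ++ [f]) = pvMx c p := by rw [hmx]; omega
    have : pvSel c (p ++ [f]) = pvSel c p := by
      simp only [pvSel, hmx', dedup_append_singleton]
      split
      · rfl
      · rw [List.filter_append, List.filter_singleton]
        have : (c f == pvMx c p) = false := by simp; omega
        simp [this]
    rw [this, hmx']
  · have hmx' : pvMx c (p ++ [f]) = pvMx c p := by rw [hmx]; omega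
    by_cases hm : f ∈ pvSel c p
    · rw [if_neg (by simp [hm])]
      have hp : f ∈ p := ((mem_pvSel c p f).mp hm).1
      rw [hmx']
      have : pvSel c (p ++ [f]) = pvSel c p := by
        simp only [pvSel, hmx', dedup_append_singleton, if_pos hp]
      rw [this]
    · rw [if_pos ⟨le_of_eq heq.symm, hm⟩, if_neg (by omega)]
      have hp : ¬ f ∈ p := fun hin => hm ((mem_pvSel c p f).mpr ⟨hin, heq⟩)
      have : pvSel c (p ++ [f]) = pvSel c p ++ [f] := by
        simp only [pvSel, hmx', dedup_append_singleton, if_neg hp, List.filter_append]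
        simp [heq]
      rw [this, hmx', heq]
  · have hp : ¬ f ∈ p := fun hin => absurd (hb f hin) (by omega)
    have hm : ¬ f ∈ pvSel c p := fun hin => hp ((mem_pvSel c p f).mp hin).1
    rw [if_pos ⟨le_of_lt hgt, hm⟩, if_pos hgt]
    have hmx' : pvMx c (p ++ [f]) = c f := by rw [hmx]; omega
    have : pvSel c (p ++ [f]) = [f] := by
      simp only [pvSel, hmx', dedup_append_singleton, if_neg hp, List.filter_append]
      have h1 : (PySem.List.dedup p).filter (fun g => c g == c f) = [] := by
        rw [List.filter_eq_nil_iff]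
        intro g hg
        have := hb g ((PySem.List.mem_dedup p g).mp hg)
        simp; omega
      rw [h1, List.filter_singleton]
      simp
    rw [this, hmx']
    rfl

theorem foldA_eq (c : String → Int) (l : List String) : ∀ (p : List String),
    l.foldl (fun st f => if c f ≥ st.2 ∧ ¬ f ∈ st.1 then
        ((if c f > st.2 then [] else st.1) ++ [f], c f) else st) (pvSel c p, pvMx c p)
      = (pvSel c (p ++ l), pvMx c (p ++ l)) := by
  induction l with
  | nil => intro p; simp
  | cons f t ih =>
    intro p
    rw [List.foldl_cons]
    show t.foldl _ (if c f ≥ pvMx c p ∧ ¬ f ∈ pvSel c p then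
        ((if c f > pvMx c p then [] else pvSel c p) ++ [f], c f) else (pvSel c p, pvMx c p)) = _
    rw [step_sel c p f, ih (p ++ [f])]
    simp

theorem foldA_eq_nil (c : String → Int) (l : List String) :
    l.foldl (fun st f => if c f ≥ st.2 ∧ ¬ f ∈ st.1 then
        ((if c f > st.2 then [] else st.1) ++ [f], c f) else st) (([] : List String), (0 : Int))
      = (pvSel c l, pvMx c l) := by
  have := foldA_eq c l []
  simpa [pvSel, pvMx] using this

theorem foldl_max_max (l : List Int) : ∀ (a b : Int),
    l.foldl max (max a b) = max a (l.foldl max b) := by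
  induction l with
  | nil => intro a b; rfl
  | cons x t ih =>
    intro a b
    rw [List.foldl_cons, List.foldl_cons, max_assoc, ih]

theorem tie_core (sv : String → Int) (l : List String) : ∀ (a : Int) (v : String),
    ((l.map sv).foldl max a = a →
      (l.foldl (fun acc f => if sv f > acc.1 then (sv f, f) else acc) (a, v)).2 = v)
    ∧ ((l.map sv).foldl max a ≠ a →
      l.find? (fun f => sv f == (l.map sv).foldl max a)
        = some ((l.foldl (fun acc f => if sv f > acc.1 then (sv f, f) else acc) (a, v)).2)) := by
  induction l with
  | nil => intro a v; exact ⟨fun _ => rfl, fun h => absurd rfl h⟩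
  | cons f t ih =>
    intro a v
    have hle : ∀ (b : Int), b ≤ (t.map sv).foldl max b := fun b => (PySem.List.le_foldl_max (t.map sv) b).1
    by_cases hgt : sv f > a
    · have hstep : (List.foldl (fun acc f => if sv f > acc.1 then (sv f, f) else acc) (a, v) (f :: t))
          = t.foldl (fun acc f => if sv f > acc.1 then (sv f, f) else acc) (sv f, f) := by
        rw [List.foldl_cons, if_pos hgt]
      have hm : ((f :: t).map sv).foldl max a = (t.map sv).foldl max (sv f) := by
        rw [List.map_cons, List.foldl_cons, max_eq_right (le_of_lt hgt)]
      constructor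
      · intro h
        exfalso
        have := hle (sv f)
        rw [hm] at h
        omega
      · intro _
        rw [hstep, hm]
        by_cases hM : (t.map sv).foldl max (sv f) = sv f
        · rw [List.find?_cons, hM]
          simp only [beq_self_eq_true]
          rw [(ih (sv f) f).1 hM]
        · rw [List.find?_cons]
          have hne : (sv f == (t.map sv).foldl max (sv f)) = false := by
            simp; omega
          rw [hne]
          simpa using (ih (sv f) f).2 (fun h => hM h)
    · have hstep : (List.foldl (fun acc f => if sv f > acc.1 then (sv f, f) else acc) (a, v) (f :: t))
          = t.foldl (fun acc f => if sv f > acc.1 then (sv f, f) else acc) (a, v) := by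
        rw [List.foldl_cons, if_neg hgt]
      have hm : ((f :: t).map sv).foldl max a = (t.map sv).foldl max a := by
        rw [List.map_cons, List.foldl_cons, max_eq_left (le_of_not_gt hgt)]
      constructor
      · intro h
        rw [hstep]
        exact (ih a v).1 (by rw [hm] at h; exact h)
      · intro h
        rw [hm] at h ⊢
        rw [hstep, List.find?_cons]
        have hbig : a < (t.map sv).foldl max a := lt_of_le_of_ne (hle a) (fun e => h e.symm)
        have hne : (sv f == (t.map sv).foldl max a) = false := by simp; omega
        rw [hne]
        simpa using (ih a v).2 h

theorem max_values (L : List String) (h : L ≠ []) :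
    (PySem.List.max? ((PySem.Set.ofList L).map (fun k => (L.count k : Int))) (fun v => v)).getD 0
      = pvMx (fun f => (L.count f : Int)) L := by
  obtain ⟨k, t, hkt⟩ : ∃ k t, PySem.Set.ofList L = k :: t := by
    cases hS : PySem.Set.ofList L with
    | nil =>
      obtain ⟨x, hx⟩ := List.exists_mem_of_ne_nil L h
      have := (PySem.Set.mem_ofList L x).mpr hx
      rw [hS] at this; simp at this
    | cons k t => exact ⟨k, t, rfl⟩
  have hmemS : ∀ g, g ∈ k :: t ↔ g ∈ L := by
    intro g; rw [← hkt, PySem.Set.mem_ofList]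
  rw [hkt, List.map_cons, PySem.List.max?_id_cons, Option.getD_some]
  have hpv : pvMx (fun f => (L.count f : Int)) L
      = (L.map (fun f => (L.count f : Int))).foldl max 0 := by
    rw [List.foldl_map]; rfl
  have hub : ∀ g ∈ L, (L.count g : Int) ≤ (t.map (fun f => (L.count f : Int))).foldl max ((L.count k : Int)) := by
    intro g hg
    rcases List.mem_cons.mp ((hmemS g).mpr hg) with hk | ht
    · rw [hk]; exact (PySem.List.le_foldl_max _ _).1
    · exact (PySem.List.le_foldl_max _ _).2 _ (List.mem_map_of_mem ht)
  have hwit : ∃ g ∈ L, (t.map (fun f => (L.count f : Int))).foldl max ((L.count k : Int)) = (L.count g : Int) := by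
    rcases PySem.List.foldl_max_mem (t.map (fun f => (L.count f : Int))) ((L.count k : Int)) with he | hm
    · exact ⟨k, (hmemS k).mp (List.mem_cons_self), he⟩
    · obtain ⟨g, hgt, hge⟩ := List.mem_map.mp hm
      exact ⟨g, (hmemS g).mp (List.mem_cons_of_mem _ hgt), hge.symm⟩
  obtain ⟨g0, hg0, hMB⟩ := hwit
  have hup : ∀ g ∈ L, (L.count g : Int) ≤ pvMx (fun f => (L.count f : Int)) L :=
    (PySem.List.le_foldl_max_int L _ 0).2
  have h1 : (t.map (fun f => (L.count f : Int))).foldl max ((L.count k : Int))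
      ≤ pvMx (fun f => (L.count f : Int)) L := hMB ▸ hup g0 hg0
  have h2 : pvMx (fun f => (L.count f : Int)) L
      ≤ (t.map (fun f => (L.count f : Int))).foldl max ((L.count k : Int)) := by
    rw [hpv]
    rcases PySem.List.foldl_max_mem (L.map (fun f => (L.count f : Int))) 0 with he | hm
    · rw [he, hMB]; positivity
    · obtain ⟨g, hgL, hge⟩ := List.mem_map.mp hm
      rw [← hge]; exact hub g hgL
  omega

theorem tie_eq (sv : String → Int) (L : List String) (hne : L ≠ []) :
    (L.foldl (fun acc f => if sv f > acc.1 then (sv f, f) else acc) ((0 : Int), "")).2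
      = (if (PySem.List.max? (L.map sv) (fun v => v)).getD 0 ≤ 0 then ""
         else (L.find? (fun f => sv f == (PySem.List.max? (L.map sv) (fun v => v)).getD 0)).getD "") := by
  obtain ⟨x, xt, hx⟩ : ∃ x xt, L.map sv = x :: xt := by
    cases hL : L with
    | nil => exact absurd hL hne
    | cons a b => exact ⟨sv a, b.map sv, by simp⟩
  have hM0 : (L.map sv).foldl max 0 = max 0 ((xt.foldl max x)) := by
    rw [hx, List.foldl_cons, foldl_max_max]
  rw [hx, PySem.List.max?_id_cons, Option.getD_some]
  by_cases hMB : xt.foldl max x ≤ 0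
  · rw [if_pos hMB]
    exact (tie_core sv L 0 "").1 (by rw [hM0]; omega)
  · rw [if_neg hMB]
    have hne0 : (L.map sv).foldl max 0 ≠ 0 := by rw [hM0]; omega
    have := (tie_core sv L 0 "").2 hne0
    have hM0' : (L.map sv).foldl max 0 = xt.foldl max x := by rw [hM0]; omega
    rw [hM0'] at this
    rw [this, Option.getD_some]

def pvSv (s : List (String × Int)) (f : String) : Int :=
  (PySem.Dict.get? (PySem.Dict.mk s) f).getD 0

def pvM (L : List String) (s : List (String × Int)) : Int :=
  (PySem.List.max? (L.map (pvSv s)) (fun v => v)).getD 0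

theorem le_max_getD (l : List Int) (a : Int) (h : a ∈ l) :
    a ≤ (PySem.List.max? l (fun v => v)).getD 0 := by
  cases l with
  | nil => simp at h
  | cons x xt =>
    rw [PySem.List.max?_id_cons, Option.getD_some]
    rcases List.mem_cons.mp h with hk | ht
    · rw [hk]; exact (PySem.List.le_foldl_max xt x).1
    · exact (PySem.List.le_foldl_max xt x).2 a ht

theorem max_getD_mem (l : List Int) (h : l ≠ []) :
    (PySem.List.max? l (fun v => v)).getD 0 ∈ l := by
  cases l with
  | nil => exact absurd rfl h
  | cons x xt =>
    rw [PySem.List.max?_id_cons, Option.getD_some]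
    rcases PySem.List.foldl_max_mem xt x with he | hm
    · rw [he]; exact List.mem_cons_self
    · exact List.mem_cons_of_mem _ hm

theorem A_unfold (L : List String) (s : List (String × Int)) (hnil : L ≠ []) :
    encontrar_pior_filme L s =
      (if (pvSel (fun f => (L.count f : Int)) L).length = 1 then
         (PySem.List.pyGet? (pvSel (fun f => (L.count f : Int)) L) 0).getD ""
       else if pvM L s ≤ 0 then ""
       else (L.find? (fun f => pvSv s f == pvM L s)).getD "") := by
  simp only [encontrar_pior_filme]
  rw [foldA_eq_nil (fun f => (L.count f : Int)) L]
  by_cases hlen : (pvSel (fun f => (L.count f : Int)) L).length = 1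
  · rw [if_pos hlen, if_pos hlen]
  · rw [if_neg hlen, if_neg hlen]
    exact tie_eq (pvSv s) L hnil

theorem B_unfold (L : List String) (s : List (String × Int)) (hnil : L ≠ []) :
    encontrar_pior_filme_alt L s =
      (if (pvSel (fun f => (L.count f : Int)) L).length = 1 then
         (PySem.List.pyGet? (pvSel (fun f => (L.count f : Int)) L) 0).getD ""
       else (L.find? (fun f => pvSv s f == pvM L s)).getD "") := by
  simp only [encontrar_pior_filme_alt, if_neg hnil]
  rw [PySem.Dict.foldl_insert_getD_add_one_eq_counter]
  have hitems : (PySem.Dict.counter L).items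
      = (PySem.Set.ofList L).map (fun k => (k, (L.count k : Int))) := PySem.Dict.items_counter L
  have hvals : (PySem.Dict.counter L).values
      = (PySem.Set.ofList L).map (fun k => (L.count k : Int)) := by
    show (PySem.Dict.counter L).items.map Prod.snd = _
    rw [hitems, List.map_map]; rfl
  rw [hvals, max_values L hnil]
  have hkeys := PySem.Dict.keys_counter L
  have hmaiores : (PySem.Dict.counter L).keys.filter
      (fun filme => (PySem.Dict.counter L).getD filme 0 == pvMx (fun f => (L.count f : Int)) L)
      = pvSel (fun f => (L.count f : Int)) L := by
    rw [hkeys, pvSel, PySem.List.dedup_eq_ofList]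
    apply List.filter_congr
    intro g _
    rw [PySem.Dict.getD_counter]
  rw [hmaiores]
  rfl

theorem port_eq (L : List String) (s : List (String × Int))
    (hnd : ¬ D_encontrar_pior_filme L s) :
    encontrar_pior_filme L s = encontrar_pior_filme_alt L s := by
  by_cases hnil : L = []
  · subst hnil; rfl
  · rw [A_unfold L s hnil, B_unfold L s hnil]
    by_cases hlen : (pvSel (fun f => (L.count f : Int)) L).length = 1
    · rw [if_pos hlen, if_pos hlen]
    · rw [if_neg hlen, if_neg hlen]
      -- ¬D_ with L ≠ [] and no unique leader yields some positive sum, so the guard is false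
      have hpos : ∃ f ∈ L, 0 < pvSv s f := by
        unfold D_encontrar_pior_filme at hnd
        push Not at hnd
        by_contra hc
        push Not at hc
        have h1 := hnd hnil (by intro f hf; simpa [pvSv] using hc f hf)
        exact absurd h1 (by simpa [pvSel, pvMx, pvMaxCount] using hlen)
      obtain ⟨f, hf, hgt⟩ := hpos
      have hle : pvSv s f ≤ pvM L s :=
        le_max_getD (L.map (pvSv s)) (pvSv s f) (List.mem_map_of_mem hf)
      rw [if_neg (by omega)]

-- ===== VERDICT (by name: the statement is the Claim_ definition above) =====
theorem encontrar_pior_filme_spec : Claim_unchanged_encontrar_pior_filme := by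
  intro vencedores_individuais soma_medias _hdom _hpre
  unfold Spec_encontrar_pior_filme
  intro hnd
  exact port_eq vencedores_individuais soma_medias hnd

theorem encontrar_pior_filme_changed : Claim_changed_encontrar_pior_filme := by
  unfold Claim_changed_encontrar_pior_filme; decide

theorem encontrar_pior_filme_tight : Claim_exact_encontrar_pior_filme := by
  intro L s _hdom hpre hd
  obtain ⟨hnil, hnp, hlen'⟩ := hd
  have hlen : ¬ (pvSel (fun f => (L.count f : Int)) L).length = 1 := by
    simpa [pvSel, pvMx, pvMaxCount] using hlen'
  rw [A_unfold L s hnil, B_unfold L s hnil, if_neg hlen, if_neg hlen]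
  -- A takes the guard: every sum is ≤ 0, so the maximum is ≤ 0
  have hM0 : pvM L s ≤ 0 := by
    have hmem : pvM L s ∈ L.map (pvSv s) :=
      max_getD_mem (L.map (pvSv s)) (by simpa using hnil)
    obtain ⟨f, hf, hfe⟩ := List.mem_map.mp hmem
    rw [← hfe]; exact hnp f hf
  rw [if_pos hM0]
  -- B finds a listed film, which is nonempty by Pre_
  have hmem : pvM L s ∈ L.map (pvSv s) :=
    max_getD_mem (L.map (pvSv s)) (by simpa using hnil)
  obtain ⟨f, hf, hfe⟩ := List.mem_map.mp hmem
  have hsome : (L.find? (fun f => pvSv s f == pvM L s)).isSome := by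
    rw [List.find?_isSome]
    exact ⟨f, hf, by simp [hfe]⟩
  obtain ⟨g, hg⟩ := Option.isSome_iff_exists.mp hsome
  have hgL : g ∈ L := List.mem_of_find?_eq_some hg
  rw [hg, Option.getD_some]
  intro e
  exact hpre.2 ⟨e ▸ hgL, hnp, hlen'⟩
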